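-- pv_equiv track=rewrite | github.com/tonghien22890/sam_trainer | scripts/general/optimized_general_model_v3.py | extract_legal_moves_combo_counts
-- ===== SOURCE A (Python) =====
-- from typing import Dict, List, Any, Tuple
--
-- def extract_legal_moves_combo_counts(legal_moves: List[Dict[str, Any]]) -> List[int]:
--     """Extract combo counts from legal_moves"""
--     combo_counts = {"single": 0, "pair": 0, "triple": 0, "four_kind": 0, "straight": 0, "double_seq": 0}
--
--     for move in legal_moves:
--         if move.get("type") == "play_cards":
--             combo_type = move.get("combo_type")
--             if combo_type in combo_counts:
--                 combo_counts[combo_type] += 1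
--
--     return [
--         combo_counts["single"],
--         combo_counts["pair"],
--         combo_counts["triple"],
--         combo_counts["four_kind"],
--         combo_counts["straight"],
--         combo_counts["double_seq"]
--     ]
-- ===== SOURCE B (Python) =====
-- COMBO_KEYS = ["single", "pair", "triple", "four_kind", "straight", "double_seq"]
--
-- def extract_legal_moves_combo_counts(legal_moves):
--     """Extract combo counts from legal_moves"""
--     return [
--         sum(1 for m in legal_moves
--             if m.get("type") == "play_cards" and m.get("combo_type") == k)
--         for k in COMBO_KEYS
--     ]
-- ===== Notes on version B (the rewrite author's own statement) =====
-- stated objective: idiomatic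
-- what changed: Replaces the mutable counting dict plus table readout with a list comprehension over the fixed key list, each entry an independent filtered count of the moves.
import Mathlib
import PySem

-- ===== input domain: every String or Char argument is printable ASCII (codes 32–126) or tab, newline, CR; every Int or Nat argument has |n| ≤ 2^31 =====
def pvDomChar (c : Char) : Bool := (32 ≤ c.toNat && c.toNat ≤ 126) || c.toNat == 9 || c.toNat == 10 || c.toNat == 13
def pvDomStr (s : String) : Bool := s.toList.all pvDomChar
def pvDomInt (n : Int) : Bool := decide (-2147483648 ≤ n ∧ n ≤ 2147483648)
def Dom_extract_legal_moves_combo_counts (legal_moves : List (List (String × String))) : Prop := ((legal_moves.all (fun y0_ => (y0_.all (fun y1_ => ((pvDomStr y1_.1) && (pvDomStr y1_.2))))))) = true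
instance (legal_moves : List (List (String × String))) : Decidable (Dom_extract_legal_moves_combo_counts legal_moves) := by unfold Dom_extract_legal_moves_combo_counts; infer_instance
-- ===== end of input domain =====

-- B replaces A's single accumulating pass over a mutable count dict by an
-- independent filtered count per key of the fixed key list (idiomatic, same cost class).

-- ===== PORT A =====
-- the loop body: for move in legal_moves: if move.get("type")=="play_cards": … += 1
def pvStepA (d : PySem.Dict String Int) (move : List (String × String)) : PySem.Dict String Int :=
  if (PySem.Dict.mk move).get? "type" == some "play_cards" then
    match (PySem.Dict.mk move).get? "combo_type" with
    | some ct => if d.contains ct then d.modify ct 0 (· + 1) else d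
    | none => d
  else d

def extract_legal_moves_combo_counts (legal_moves : List (List (String × String))) : List Int :=
  let combo_counts := legal_moves.foldl pvStepA
    (PySem.Dict.ofList [("single", 0), ("pair", 0), ("triple", 0), ("four_kind", 0), ("straight", 0), ("double_seq", 0)])
  [ combo_counts.getD "single" 0
  , combo_counts.getD "pair" 0
  , combo_counts.getD "triple" 0
  , combo_counts.getD "four_kind" 0
  , combo_counts.getD "straight" 0
  , combo_counts.getD "double_seq" 0 ]

-- ===== PORT B =====
def pvComboKeys : List String := ["single", "pair", "triple", "four_kind", "straight", "double_seq"]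

-- m.get("type") == "play_cards" and m.get("combo_type") == k
def pvPredB (k : String) (m : List (String × String)) : Bool :=
  (PySem.Dict.mk m).get? "type" == some "play_cards" && (PySem.Dict.mk m).get? "combo_type" == some k

def extract_legal_moves_combo_counts_alt (legal_moves : List (List (String × String))) : List Int :=
  pvComboKeys.map (fun k => (legal_moves.countP (pvPredB k) : Int))

-- ===== PRECONDITION & SPEC =====
def Spec_extract_legal_moves_combo_counts (legal_moves : List (List (String × String))) (out : List Int) : Prop := out = extract_legal_moves_combo_counts_alt legal_moves
instance (legal_moves : List (List (String × String))) (out : List Int) : Decidable (Spec_extract_legal_moves_combo_counts legal_moves out) := by unfold Spec_extract_legal_moves_combo_counts; infer_instance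

-- ===== CLAIM (what is proved, stated in full; the proofs are below) =====
def Claim_equal_extract_legal_moves_combo_counts : Prop := ∀ (legal_moves : List (List (String × String))), Dom_extract_legal_moves_combo_counts legal_moves → Spec_extract_legal_moves_combo_counts legal_moves (extract_legal_moves_combo_counts legal_moves)

-- ===== LEMMAS AND PROOFS =====

-- loop invariant: on a dict whose key list is exactly pvComboKeys, A's fold adds,
-- at each listed key k, the number of moves B's predicate for k accepts
lemma pvLoopA (ms : List (List (String × String))) :
    ∀ (d : PySem.Dict String Int), d.keys = pvComboKeys →
    ∀ k, k ∈ pvComboKeys →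
      (ms.foldl pvStepA d).getD k 0 = d.getD k 0 + (ms.countP (pvPredB k) : Int) := by
  induction ms with
  | nil => intro d _ k _; simp
  | cons m ms ih =>
    intro d hd k hk
    have hkeys : (pvStepA d m).keys = pvComboKeys := by
      unfold pvStepA
      split_ifs with h1
      · cases hc : (PySem.Dict.mk m).get? "combo_type" with
        | none => simpa using hd
        | some ct =>
          simp only
          split_ifs with h2
          · simp only [PySem.Dict.modify]
            rw [PySem.Dict.keys_insert_of_contains]
            · exact hd
            · exact h2
          · exact hd
      · exact hd
    rw [List.foldl_cons, List.countP_cons, ih _ hkeys k hk]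
    have hcont : ∀ ct, d.contains ct = decide (ct ∈ pvComboKeys) := by
      intro ct; rw [PySem.Dict.contains_eq_decide_mem_keys, hd]
    unfold pvStepA pvPredB
    cases h1 : ((PySem.Dict.mk m).get? "type" == some "play_cards") with
    | false => simp
    | true =>
      simp only [if_true, Bool.true_and]
      cases hc : (PySem.Dict.mk m).get? "combo_type" with
      | none => simp
      | some ct =>
        by_cases hmem : ct ∈ pvComboKeys
        · simp only [hcont, hmem, decide_true, if_true]
          rw [PySem.Dict.getD_modify]
          by_cases hek : k = ct
          · subst hek; simp; omega
          · simp [hek, Ne.symm hek]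
        · have : ct ≠ k := fun h => hmem (h ▸ hk)
          simp [hcont, hmem, this]

theorem extract_legal_moves_combo_counts_spec : Claim_equal_extract_legal_moves_combo_counts := by
  intro legal_moves _
  unfold Spec_extract_legal_moves_combo_counts extract_legal_moves_combo_counts
    extract_legal_moves_combo_counts_alt
  have h := pvLoopA legal_moves
    (PySem.Dict.ofList [("single", 0), ("pair", 0), ("triple", 0), ("four_kind", 0), ("straight", 0), ("double_seq", 0)])
    (by decide)
  simp only [pvComboKeys, List.map_cons, List.map_nil]
  rw [h "single" (by decide), h "pair" (by decide), h "triple" (by decide),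
      h "four_kind" (by decide), h "straight" (by decide), h "double_seq" (by decide)]
  have h0 : ∀ k, k ∈ pvComboKeys →
      (PySem.Dict.ofList [("single", (0:Int)), ("pair", 0), ("triple", 0), ("four_kind", 0), ("straight", 0), ("double_seq", 0)]).getD k 0 = 0 := by
    decide
  rw [h0 "single" (by decide), h0 "pair" (by decide), h0 "triple" (by decide),
      h0 "four_kind" (by decide), h0 "straight" (by decide), h0 "double_seq" (by decide)]
  simp
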